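-- pv_equiv track=rewrite | github.com/HannahRickmann/Advent-of-Code-2025 | day08/solution.py | include_box_in_circuits
-- ===== SOURCE A (Python) =====
-- def include_box_in_circuits(min_pair, circuits):
--     # Find which circuits (if any) contain the boxes
--     circuits_with_boxes = [circuit for circuit in circuits if any(box in circuit for box in min_pair)]
--
--     if len(circuits_with_boxes) == 0:
--         # Case 1: Neither box is in any circuit → create new circuit
--         circuits.append(list(min_pair))
--
--     elif len(circuits_with_boxes) == 1:
--         # Case 2: One box is in a circuit → add the missing box
--         circuit = circuits_with_boxes[0]
--         missing_box = [box for box in min_pair if box not in circuit]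
--         if len(missing_box) != 0:
--             circuit.append(missing_box[0])
--
--     elif len(circuits_with_boxes) == 2:
--         # Case 3: Both boxes are in different circuits → merge circuits
--         c1, c2 = circuits_with_boxes
--         c1.extend(c2)       # add all boxes from c2 into c1
--         circuits.remove(c2)  # remove the now-empty c2
--
--     return circuits
-- ===== SOURCE B (Python) =====
-- def include_box_in_circuits(min_pair, circuits):
--     # Build an index table box -> circuit index, then edit by direct lookup.
--     home = {}
--     for i, circuit in enumerate(circuits):
--         for box in circuit:
--             home[box] = i
--     matched = []
--     for box in min_pair:
--         if box in home and home[box] not in matched: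
--             matched.append(home[box])
--     if len(matched) == 0:
--         circuits.append(list(min_pair))
--     elif len(matched) == 1:
--         circuit = circuits[matched[0]]
--         if min_pair[0] not in circuit:
--             circuit.append(min_pair[0])
--         elif min_pair[1] not in circuit:
--             circuit.append(min_pair[1])
--     else:
--         lo, hi = min(matched), max(matched)
--         circuits[lo].extend(circuits[hi])
--         del circuits[hi]
--     return circuits
-- ===== Notes on version B (the rewrite author's own statement) =====
-- stated objective: alternative
-- what changed: A filters the circuit list by a per-circuit membership scan and branches on the filtered list's length (with a value-based list.remove); B first builds a dict mapping every box to the index of its circuit in one pass, then decides the case from direct lookups of the two boxes and edits the list by index (extend at min index, delete max index).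
-- outside the precondition, e.g. on include_box_in_circuits((1, 2), [[1], [1], [3]]): A returns [[1, 1], [3]], B returns [[1], [1, 2], [3]]
import Mathlib
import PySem

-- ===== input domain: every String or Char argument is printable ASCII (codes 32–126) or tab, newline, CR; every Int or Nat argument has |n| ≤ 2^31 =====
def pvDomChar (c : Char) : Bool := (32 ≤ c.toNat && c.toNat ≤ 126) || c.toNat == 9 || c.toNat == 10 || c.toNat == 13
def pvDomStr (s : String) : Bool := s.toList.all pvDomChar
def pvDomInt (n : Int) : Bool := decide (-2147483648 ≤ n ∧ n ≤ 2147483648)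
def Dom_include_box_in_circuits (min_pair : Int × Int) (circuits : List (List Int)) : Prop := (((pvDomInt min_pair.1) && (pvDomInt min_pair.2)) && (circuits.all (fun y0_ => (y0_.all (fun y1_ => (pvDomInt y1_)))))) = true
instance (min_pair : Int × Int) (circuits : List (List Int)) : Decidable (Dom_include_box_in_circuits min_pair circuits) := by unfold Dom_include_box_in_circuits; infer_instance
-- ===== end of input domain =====

-- B replaces A's filter-the-matching-circuits-then-branch shape (with its value-based
-- list.remove scan) by an index table: one pass builds a dict box -> circuit index, the
-- case is decided by direct lookups of the two boxes, and the list is edited by index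
-- (objective: alternative, same cost). Both A and B mutate `circuits` in place in Python
-- and return it; the theorem is about the returned value.

-- ===== PORT A =====
-- 'any(box in circuit for box in min_pair)'
def pvPred (min_pair : Int × Int) (c : List Int) : Bool :=
  decide (min_pair.1 ∈ c) || decide (min_pair.2 ∈ c)

def include_box_in_circuits (min_pair : Int × Int) (circuits : List (List Int)) : List (List Int) :=
  let cwb := circuits.filter (pvPred min_pair)
  if cwb.length = 0 then
    circuits ++ [[min_pair.1, min_pair.2]]
  else if cwb.length = 1 then
    let circuit := cwb.headD []
    let missing := [min_pair.1, min_pair.2].filter (fun b => decide (b ∉ circuit))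
    if missing.length ≠ 0 then
      -- 'circuit.append(missing_box[0])' mutates the object cwb[0], which sits at the first
      -- position of circuits whose element matches the predicate
      circuits.set (circuits.findIdx (pvPred min_pair)) (circuit ++ [missing.headD 0])
    else circuits
  else if cwb.length = 2 then
    let c2 := cwb.getD 1 []
    -- 'c1.extend(c2)' mutates the object cwb[0] (first matching position); then
    -- 'circuits.remove(c2)' deletes the first element equal to c2 (always present here)
    let circuits' := circuits.set (circuits.findIdx (pvPred min_pair)) (cwb.headD [] ++ c2)
    (PySem.List.remove? circuits' c2).getD circuits'
  else circuits

-- ===== PORT B =====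
-- Source B's index-table pass: 'for i, circuit in enumerate(circuits): for box in circuit: home[box] = i'
def pvBuildHome : List (List Int) → Nat → PySem.Dict Int Nat → PySem.Dict Int Nat
  | [], _, d => d
  | c :: rest, i, d => pvBuildHome rest (i + 1) (c.foldl (fun d b => d.insert b i) d)

def include_box_in_circuits_alt (min_pair : Int × Int) (circuits : List (List Int)) : List (List Int) :=
  let home := pvBuildHome circuits 0 PySem.Dict.empty
  -- 'for box in min_pair: if box in home and home[box] not in matched: matched.append(home[box])'
  -- (the two iterations of the fixed-arity pair loop, written out)
  let m0 : List Nat := match home.get? min_pair.1 with | some i => [i] | none => []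
  let matched : List Nat :=
    match home.get? min_pair.2 with
    | some j => if j ∈ m0 then m0 else m0 ++ [j]
    | none => m0
  if matched.length = 0 then
    circuits ++ [[min_pair.1, min_pair.2]]
  else if matched.length = 1 then
    let f := matched.headD 0
    let circuit := circuits.getD f []
    if min_pair.1 ∉ circuit then circuits.set f (circuit ++ [min_pair.1])
    else if min_pair.2 ∉ circuit then circuits.set f (circuit ++ [min_pair.2])
    else circuits
  else
    let lo := min (matched.headD 0) (matched.getD 1 0)
    let hi := max (matched.headD 0) (matched.getD 1 0)
    (circuits.set lo (circuits.getD lo [] ++ circuits.getD hi [])).eraseIdx hi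

-- ===== PRECONDITION & SPEC =====
-- Pre_ excludes inputs where some box of min_pair lies in TWO OR MORE circuits: such inputs
-- break the disjoint-groups invariant this merge step maintains, and which of the sharing
-- circuits 'owns' the box is then an accident of each implementation's scan order.
def Pre_include_box_in_circuits (min_pair : Int × Int) (circuits : List (List Int)) : Prop :=
  (circuits.filter (fun c => decide (min_pair.1 ∈ c))).length ≤ 1 ∧
  (circuits.filter (fun c => decide (min_pair.2 ∈ c))).length ≤ 1
instance (min_pair : Int × Int) (circuits : List (List Int)) : Decidable (Pre_include_box_in_circuits min_pair circuits) := by unfold Pre_include_box_in_circuits; infer_instance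

def pvWitness_include_box_in_circuits : (Int × Int) × List (List Int) := ((1, 2), [[1], [3]])

def Spec_include_box_in_circuits (min_pair : Int × Int) (circuits : List (List Int)) (out : List (List Int)) : Prop := out = include_box_in_circuits_alt min_pair circuits
instance (min_pair : Int × Int) (circuits : List (List Int)) (out : List (List Int)) : Decidable (Spec_include_box_in_circuits min_pair circuits out) := by unfold Spec_include_box_in_circuits; infer_instance

-- ===== CLAIM (what is proved, stated in full; the proofs are below) =====
def Claim_equal_include_box_in_circuits : Prop := ∀ (min_pair : Int × Int) (circuits : List (List Int)), Dom_include_box_in_circuits min_pair circuits → Pre_include_box_in_circuits min_pair circuits → Spec_include_box_in_circuits min_pair circuits (include_box_in_circuits min_pair circuits)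

-- ===== LEMMAS AND PROOFS =====

/-- The inner 'for box in circuit: home[box] = i' loop, as one equation on get?. -/
lemma pv_get?_foldl_insert (b : Int) (i : Nat) :
    ∀ (c : List Int) (d : PySem.Dict Int Nat),
      (c.foldl (fun d x => d.insert x i) d).get? b = if b ∈ c then some i else d.get? b := by
  intro c
  induction c with
  | nil => intro d; simp
  | cons x t ih =>
    intro d
    rw [List.foldl_cons, ih]
    by_cases ht : b ∈ t
    · simp [ht]
    · by_cases hx : b = x <;> simp [ht, hx, PySem.Dict.get?_insert]

/-- Index of the LAST circuit containing `b` (dict overwrite keeps the latest index). -/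
def pvLastIdx? (b : Int) : List (List Int) → Option Nat
  | [] => none
  | c :: rest =>
    match pvLastIdx? b rest with
    | some k => some (k + 1)
    | none => if b ∈ c then some 0 else none

lemma pv_home_get (b : Int) :
    ∀ (l : List (List Int)) (i : Nat) (d : PySem.Dict Int Nat),
      (pvBuildHome l i d).get? b =
        match pvLastIdx? b l with
        | some k => some (i + k)
        | none => d.get? b := by
  intro l
  induction l with
  | nil => intro i d; simp [pvBuildHome, pvLastIdx?]
  | cons c t ih =>
    intro i d
    rw [pvBuildHome, ih]
    cases e : pvLastIdx? b t with
    | some k => simp [pvLastIdx?, e, Nat.add_assoc, Nat.add_comm 1 k]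
    | none =>
      by_cases hb : b ∈ c <;> simp [pvLastIdx?, e, pv_get?_foldl_insert, hb]

lemma pv_home_get0 (b : Int) (l : List (List Int)) :
    (pvBuildHome l 0 PySem.Dict.empty).get? b = pvLastIdx? b l := by
  rw [pv_home_get]
  cases e : pvLastIdx? b l <;> simp

lemma pvLast_sound (b : Int) :
    ∀ (l : List (List Int)) (k : Nat), pvLastIdx? b l = some k → ∃ h : k < l.length, b ∈ l[k] := by
  intro l
  induction l with
  | nil => intro k h; simp [pvLastIdx?] at h
  | cons c t ih =>
    intro k h
    rw [pvLastIdx?] at h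
    cases e : pvLastIdx? b t with
    | some m =>
      rw [e] at h
      obtain ⟨hm, hmem⟩ := ih m e
      obtain rfl : k = m + 1 := by simpa using h.symm
      exact ⟨by simpa using hm, by simpa using hmem⟩
    | none =>
      rw [e] at h
      by_cases hb : b ∈ c
      · rw [if_pos hb] at h
        obtain rfl : k = 0 := by simpa using h.symm
        exact ⟨Nat.succ_pos _, by simpa using hb⟩
      · rw [if_neg hb] at h; simp at h

lemma pvLast_none (b : Int) :
    ∀ (l : List (List Int)), pvLastIdx? b l = none → ∀ (k : Nat) (h : k < l.length), b ∉ l[k] := by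
  intro l
  induction l with
  | nil => intro _ k h; simp at h
  | cons c t ih =>
    intro h k hk
    rw [pvLastIdx?] at h
    cases e : pvLastIdx? b t with
    | some m => rw [e] at h; simp at h
    | none =>
      rw [e] at h
      have hc : b ∉ c := by
        intro hb; rw [if_pos hb] at h; simp at h
      cases k with
      | zero => simpa using hc
      | succ k' => simpa using ih e k' (by simpa using hk)

/-- Two distinct matching positions force the filter to have length ≥ 2. -/
lemma pv_two_le_filter {p : List Int → Bool} :
    ∀ (l : List (List Int)) (k1 k2 : Nat) (h1 : k1 < l.length) (h2 : k2 < l.length),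
      k1 < k2 → p l[k1] = true → p l[k2] = true → 2 ≤ (l.filter p).length := by
  intro l
  induction l with
  | nil => intro k1 k2 h1; simp at h1
  | cons c t ih =>
    intro k1 k2 h1 h2 hlt hp1 hp2
    cases k1 with
    | zero =>
      obtain ⟨k2', rfl⟩ : ∃ k2', k2 = k2' + 1 := ⟨k2 - 1, by omega⟩
      have hpc : p c = true := by simpa using hp1
      have hmem : t[k2']'(by simpa using h2) ∈ t.filter p :=
        List.mem_filter.mpr ⟨List.getElem_mem _, by simpa using hp2⟩
      have : 1 ≤ (t.filter p).length :=
        List.length_pos_iff.mpr (List.ne_nil_of_mem hmem)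
      simp only [List.filter_cons_of_pos hpc, List.length_cons]
      omega
    | succ k1' =>
      obtain ⟨k2', rfl⟩ : ∃ k2', k2 = k2' + 1 := ⟨k2 - 1, by omega⟩
      have := ih k1' k2' (by simpa using h1) (by simpa using h2) (by omega)
        (by simpa using hp1) (by simpa using hp2)
      by_cases hpc : p c = true <;>
        simp only [List.filter_cons, hpc, if_true, if_false, List.length_cons,
          Bool.false_eq_true] <;> omega

/-- Under the ≤-one-circuit invariant, membership determines pvLastIdx?. -/
lemma pv_pos_unique (b : Int) (l : List (List Int))
    (hPre : (l.filter (fun c => decide (b ∈ c))).length ≤ 1)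
    (k : Nat) (hk : k < l.length) (hb : b ∈ l[k]) : pvLastIdx? b l = some k := by
  cases e : pvLastIdx? b l with
  | none => exact absurd hb (pvLast_none b l e k hk)
  | some k' =>
    obtain ⟨hk', hb'⟩ := pvLast_sound b l k' e
    rcases Nat.lt_trichotomy k k' with h | h | h
    · exact absurd (pv_two_le_filter (p := fun c => decide (b ∈ c)) l k k' hk hk' h
        (by simpa using hb) (by simpa using hb')) (by omega)
    · rw [h]
    · exact absurd (pv_two_le_filter (p := fun c => decide (b ∈ c)) l k' k hk' hk h
        (by simpa using hb') (by simpa using hb)) (by omega)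

/-- Converse direction: a position satisfying `p` that is minimal is what `findIdx?` returns. -/
lemma pv_findIdx?_of {p : List Int → Bool} :
    ∀ (l : List (List Int)) (i : Nat) (hi : i < l.length), p l[i] = true →
      (∀ k, (hk : k < l.length) → p l[k] = true → i ≤ k) → l.findIdx? p = some i := by
  intro l
  induction l with
  | nil => intro i hi; simp at hi
  | cons c t ih =>
    intro i hi hp hmin
    cases i with
    | zero => rw [List.findIdx?_cons, if_pos (by simpa using hp)]
    | succ i' =>
      have hpc : p c = false := by
        cases hpc : p c
        · rfl
        · have := hmin 0 (Nat.succ_pos _) hpc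
          omega
      rw [List.findIdx?_cons, if_neg (by simp [hpc])]
      have : t.findIdx? p = some i' := by
        refine ih i' (by simpa using hi) (by simpa using hp) ?_
        intro k hk hpk
        have := hmin (k + 1) (by simpa using Nat.succ_lt_succ hk) (by simpa using hpk)
        omega
      rw [this]
      rfl

/-- If `p` holds exactly at position `i`, the filter is the singleton at `i`. -/
lemma pv_filter_single {p : List Int → Bool} :
    ∀ (l : List (List Int)) (i : Nat) (hi : i < l.length),
      (∀ k, (hk : k < l.length) → (p l[k] = true ↔ k = i)) → l.filter p = [l[i]] := by
  intro l
  induction l with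
  | nil => intro i hi; simp at hi
  | cons c t ih =>
    intro i hi h
    cases i with
    | zero =>
      have hpc : p c = true := (h 0 (Nat.succ_pos _)).mpr rfl
      have hnil : t.filter p = [] := by
        rw [List.filter_eq_nil_iff]
        intro a ha hpa
        rcases List.mem_iff_getElem.mp ha with ⟨k, hk, rfl⟩
        have := (h (k + 1) (by simpa using Nat.succ_lt_succ hk)).mp (by simpa using hpa)
        omega
      simp [List.filter_cons_of_pos hpc, hnil]
    | succ i' =>
      have hpc : p c = false := by
        cases hpc : p c
        · rfl
        · have := (h 0 (Nat.succ_pos _)).mp hpc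
          omega
      have hrec := ih i' (by simpa using hi) (fun k hk => by
        have h2 := h (k + 1) (by simpa using Nat.succ_lt_succ hk)
        simp only [List.getElem_cons_succ] at h2
        constructor
        · intro hp; have := h2.mp hp; omega
        · intro hk'; exact h2.mpr (by omega))
      rw [List.filter_cons_of_neg (by simp [hpc])]
      simpa using hrec

/-- If `p` holds exactly at the two positions `i < j`, the filter is the ordered pair. -/
lemma pv_filter_pair {p : List Int → Bool} :
    ∀ (l : List (List Int)) (i j : Nat) (hij : i < j) (hj : j < l.length),
      (∀ k, (hk : k < l.length) → (p l[k] = true ↔ (k = i ∨ k = j))) →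
      l.filter p = [l[i]'(Nat.lt_trans hij hj), l[j]] := by
  intro l
  induction l with
  | nil => intro i j hij hj; simp at hj
  | cons c t ih =>
    intro i j hij hj h
    obtain ⟨j', rfl⟩ : ∃ j', j = j' + 1 := ⟨j - 1, by omega⟩
    cases i with
    | zero =>
      have hpc : p c = true := (h 0 (Nat.succ_pos _)).mpr (Or.inl rfl)
      have hsingle : t.filter p = [t[j']'(by simpa using hj)] := by
        refine pv_filter_single t j' (by simpa using hj) (fun k hk => ?_)
        have h2 := h (k + 1) (by simpa using Nat.succ_lt_succ hk)
        simp only [List.getElem_cons_succ] at h2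
        constructor
        · intro hp; have := h2.mp hp; omega
        · intro hk'; exact h2.mpr (Or.inr (by omega))
      rw [List.filter_cons_of_pos hpc, hsingle]
      simp
    | succ i' =>
      have hpc : p c = false := by
        cases hpc : p c
        · rfl
        · have := (h 0 (Nat.succ_pos _)).mp hpc
          omega
      have hrec := ih i' j' (by omega) (by simpa using hj) (fun k hk => by
        have h2 := h (k + 1) (by simpa using Nat.succ_lt_succ hk)
        simp only [List.getElem_cons_succ] at h2
        constructor
        · intro hp; have := h2.mp hp; omega
        · intro hk'; exact h2.mpr (by omega))
      rw [List.filter_cons_of_neg (by simp [hpc])]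
      simpa using hrec

/-- The whole merge case of A, as one equation. -/
lemma pv_merge (mp : Int × Int) (l : List (List Int)) (lo hi : Nat)
    (hlt : lo < hi) (hhi : hi < l.length)
    (hpos : ∀ k, (hk : k < l.length) → (pvPred mp l[k] = true ↔ (k = lo ∨ k = hi))) :
    include_box_in_circuits mp l =
      (l.set lo (l[lo]'(Nat.lt_trans hlt hhi) ++ l[hi])).eraseIdx hi := by
  have hlo : lo < l.length := Nat.lt_trans hlt hhi
  have hfil : l.filter (pvPred mp) = [l[lo], l[hi]] := pv_filter_pair l lo hi hlt hhi hpos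
  have hfi : l.findIdx? (pvPred mp) = some lo :=
    pv_findIdx?_of l lo hlo ((hpos lo hlo).mpr (Or.inl rfl))
      (fun k hk hpk => by have := (hpos k hk).mp hpk; omega)
  have hfidx : l.findIdx (pvPred mp) = lo := (List.findIdx?_eq_some_iff_findIdx_eq.mp hfi).2
  have hplo : pvPred mp l[lo] = true := (hpos lo hlo).mpr (Or.inl rfl)
  have hlone : l[lo] ≠ [] := by
    rcases (by simpa [pvPred] using hplo : mp.1 ∈ l[lo] ∨ mp.2 ∈ l[lo]) with h0 | h0 <;>
      exact List.ne_nil_of_mem h0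
  set l' := l.set lo (l[lo] ++ l[hi]) with hl'
  have hlen' : l'.length = l.length := by simp [hl']
  have hget' : ∀ k, (hk : k < l.length) → l'[k]'(by omega) = if lo = k then l[lo] ++ l[hi] else l[k] := by
    intro k hk
    simp [hl', List.getElem_set]
  have hathi : l'[hi]'(by omega) = l[hi] := by rw [hget' hi hhi, if_neg (by omega)]
  have hmem : l[hi] ∈ l' := hathi ▸ List.getElem_mem (by omega)
  have hidx : List.idxOf? l[hi] l' = some hi := by
    rw [List.idxOf?_eq_some_iff]
    refine ⟨by omega, hathi, ?_⟩
    intro k hk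
    by_cases hkl : k = lo
    · subst hkl
      rw [hget' k (by omega), if_pos rfl]
      intro hcontra
      have hlen := congrArg List.length hcontra
      rw [List.length_append] at hlen
      exact hlone (List.length_eq_zero_iff.mp (by omega))
    · rw [hget' k (by omega), if_neg (by omega)]
      intro hcontra
      have hpk : pvPred mp (l[k]'(by omega)) = true := by
        rw [hcontra]; exact (hpos hi hhi).mpr (Or.inr rfl)
      have := (hpos k (by omega)).mp hpk
      omega
  have herase : l'.erase l[hi] = l'.eraseIdx hi := by
    rw [List.erase_eq_eraseIdx, hidx]
  have hrm : PySem.List.remove? l' l[hi] = some (l'.erase l[hi]) :=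
    PySem.List.remove?_eq_some_erase _ _ hmem
  have hA : include_box_in_circuits mp l = (PySem.List.remove? l' l[hi]).getD l' := by
    rw [hl']
    simp [include_box_in_circuits, hfil, hfidx, List.getD]
  rw [hA, hrm, Option.getD_some, herase]

-- ===== VERDICT (by name: the statement is the Claim_ definition above) =====
theorem include_box_in_circuits_spec : Claim_equal_include_box_in_circuits := by
  intro mp l _hDom hPre
  obtain ⟨hPre1, hPre2⟩ := hPre
  unfold Spec_include_box_in_circuits
  cases e1 : pvLastIdx? mp.1 l with
  | none =>
    have hn1 := pvLast_none mp.1 l e1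
    cases e2 : pvLastIdx? mp.2 l with
    | none =>
      -- neither box anywhere: both append a new circuit
      have hn2 := pvLast_none mp.2 l e2
      have hfil : l.filter (pvPred mp) = [] := by
        rw [List.filter_eq_nil_iff]
        intro c hc hpc
        rcases List.mem_iff_getElem.mp hc with ⟨k, hk, rfl⟩
        rcases (by simpa [pvPred] using hpc : mp.1 ∈ l[k] ∨ mp.2 ∈ l[k]) with h | h
        · exact hn1 k hk h
        · exact hn2 k hk h
      have hB : include_box_in_circuits_alt mp l = l ++ [[mp.1, mp.2]] := by
        simp [include_box_in_circuits_alt, pv_home_get0, e1, e2]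
      rw [hB]
      simp [include_box_in_circuits, hfil]
    | some j =>
      -- only mp.2 is in a circuit (at j): mp.1 gets appended there
      obtain ⟨hj, hbj⟩ := pvLast_sound mp.2 l j e2
      have hpos : ∀ k, (hk : k < l.length) → (pvPred mp l[k] = true ↔ k = j) := by
        intro k hk
        constructor
        · intro hp
          rcases (by simpa [pvPred] using hp : mp.1 ∈ l[k] ∨ mp.2 ∈ l[k]) with h | h
          · exact absurd h (hn1 k hk)
          · have := pv_pos_unique mp.2 l hPre2 k hk h
            rw [e2] at this; simpa using this.symm
        · rintro rfl; simp [pvPred, hbj]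
      have hfil := pv_filter_single l j hj hpos
      have hfi : l.findIdx? (pvPred mp) = some j :=
        pv_findIdx?_of l j hj ((hpos j hj).mpr rfl)
          (fun k hk hpk => le_of_eq ((hpos k hk).mp hpk).symm)
      have hfidx := (List.findIdx?_eq_some_iff_findIdx_eq.mp hfi).2
      have hm1 : mp.1 ∉ l[j] := hn1 j hj
      have hB : include_box_in_circuits_alt mp l = l.set j (l[j] ++ [mp.1]) := by
        simp [include_box_in_circuits_alt, pv_home_get0, e1, e2,
          List.getElem?_eq_getElem hj, hm1]
      rw [hB]
      simp [include_box_in_circuits, hfil, hfidx, hm1, hbj]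
  | some i =>
    obtain ⟨hi, hbi⟩ := pvLast_sound mp.1 l i e1
    cases e2 : pvLastIdx? mp.2 l with
    | none =>
      -- only mp.1 is in a circuit (at i): mp.2 gets appended there
      have hn2 := pvLast_none mp.2 l e2
      have hpos : ∀ k, (hk : k < l.length) → (pvPred mp l[k] = true ↔ k = i) := by
        intro k hk
        constructor
        · intro hp
          rcases (by simpa [pvPred] using hp : mp.1 ∈ l[k] ∨ mp.2 ∈ l[k]) with h | h
          · have := pv_pos_unique mp.1 l hPre1 k hk h
            rw [e1] at this; simpa using this.symm
          · exact absurd h (hn2 k hk)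
        · rintro rfl; simp [pvPred, hbi]
      have hfil := pv_filter_single l i hi hpos
      have hfi : l.findIdx? (pvPred mp) = some i :=
        pv_findIdx?_of l i hi ((hpos i hi).mpr rfl)
          (fun k hk hpk => le_of_eq ((hpos k hk).mp hpk).symm)
      have hfidx := (List.findIdx?_eq_some_iff_findIdx_eq.mp hfi).2
      have hm2 : mp.2 ∉ l[i] := hn2 i hi
      have hB : include_box_in_circuits_alt mp l = l.set i (l[i] ++ [mp.2]) := by
        simp [include_box_in_circuits_alt, pv_home_get0, e1, e2,
          List.getElem?_eq_getElem hi, hbi, hm2]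
      rw [hB]
      simp [include_box_in_circuits, hfil, hfidx, hbi, hm2]
    | some j =>
      obtain ⟨hj, hbj⟩ := pvLast_sound mp.2 l j e2
      by_cases hij : j = i
      · -- both boxes in the same circuit: unchanged
        subst hij
        have hpos : ∀ k, (hk : k < l.length) → (pvPred mp l[k] = true ↔ k = j) := by
          intro k hk
          constructor
          · intro hp
            rcases (by simpa [pvPred] using hp : mp.1 ∈ l[k] ∨ mp.2 ∈ l[k]) with h | h
            · have := pv_pos_unique mp.1 l hPre1 k hk h
              rw [e1] at this; simpa using this.symm
            · have := pv_pos_unique mp.2 l hPre2 k hk h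
              rw [e2] at this; simpa using this.symm
          · rintro rfl; simp [pvPred, hbi]
        have hfil := pv_filter_single l j hj hpos
        have hB : include_box_in_circuits_alt mp l = l := by
          simp [include_box_in_circuits_alt, pv_home_get0, e1, e2,
            List.getElem?_eq_getElem hj, hbi, hbj]
        rw [hB]
        simp [include_box_in_circuits, hfil, hbi, hbj]
      · -- boxes in two different circuits: merge into the earlier one
        have hpos : ∀ k, (hk : k < l.length) → (pvPred mp l[k] = true ↔ (k = i ∨ k = j)) := by
          intro k hk
          constructor
          · intro hp
            rcases (by simpa [pvPred] using hp : mp.1 ∈ l[k] ∨ mp.2 ∈ l[k]) with h | h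
            · have := pv_pos_unique mp.1 l hPre1 k hk h
              rw [e1] at this; exact Or.inl (by simpa using this.symm)
            · have := pv_pos_unique mp.2 l hPre2 k hk h
              rw [e2] at this; exact Or.inr (by simpa using this.symm)
          · rintro (rfl | rfl)
            · simp [pvPred, hbi]
            · simp [pvPred, hbj]
        have hB : include_box_in_circuits_alt mp l =
            (l.set (min i j) (l.getD (min i j) [] ++ l.getD (max i j) [])).eraseIdx (max i j) := by
          simp [include_box_in_circuits_alt, pv_home_get0, e1, e2, hij]
        rcases Nat.lt_or_ge i j with hlt | hge
        · have hmin : min i j = i := Nat.min_eq_left (Nat.le_of_lt hlt)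
          have hmax : max i j = j := Nat.max_eq_right (Nat.le_of_lt hlt)
          rw [hB, hmin, hmax, pv_merge mp l i j hlt hj hpos]
          simp [List.getD, List.getElem?_eq_getElem hi, List.getElem?_eq_getElem hj]
        · have hlt : j < i := Nat.lt_of_le_of_ne hge hij
          have hmin : min i j = j := Nat.min_eq_right (Nat.le_of_lt hlt)
          have hmax : max i j = i := Nat.max_eq_left (Nat.le_of_lt hlt)
          have hpos' : ∀ k, (hk : k < l.length) → (pvPred mp l[k] = true ↔ (k = j ∨ k = i)) := by
            intro k hk
            rw [hpos k hk]
            tauto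
          rw [hB, hmin, hmax, pv_merge mp l j i hlt hi hpos']
          simp [List.getD, List.getElem?_eq_getElem hi, List.getElem?_eq_getElem hj]
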